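-- pv_equiv track=rewrite | github.com/mohammedansari499/Clothify-w | WardrobeAI/backend/app/services/outfit_service.py | _group_by_slot
-- ===== SOURCE A (Python) =====
-- TOP_TYPES = {"shirt", "tshirt", "formal_shirt", "hoodie", "sweater", "kurta", "sherwani", "blazer"}
--
-- BOTTOM_TYPES = {"jeans", "formal_pants", "cargo_pants", "shorts", "track_pants", "pyjama", "pants", "skirt"}
--
-- SHOE_TYPES = {"shoes", "sneakers", "loafers", "sandals", "slippers"}
--
-- OUTERWEAR_TYPES = {"jacket", "coat", "blazer", "hoodie", "sweater"}
--
-- ACCESSORY_TYPES = {"watch", "belt", "cap", "socks", "ring", "chain", "bracelet", "tie", "scarf", "bag", "accessories"}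
--
-- def _group_by_slot(clothes):
--     """Group clothes into outfit slots: tops, bottoms, shoes, outerwear, accessories."""
--     slots = {
--         "top": [],
--         "bottom": [],
--         "shoes": [],
--         "outerwear": [],
--         "accessory": [],
--     }
--
--     for item in clothes:
--         item_type = item.get("type", "unknown")
--         if item_type in TOP_TYPES:
--             slots["top"].append(item)
--         elif item_type in BOTTOM_TYPES:
--             slots["bottom"].append(item)
--         elif item_type in SHOE_TYPES:
--             slots["shoes"].append(item)
--         elif item_type in OUTERWEAR_TYPES:
--             slots["outerwear"].append(item)
--         elif item_type in ACCESSORY_TYPES: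
--             slots["accessory"].append(item)
--         else:
--             # Try to guess based on the type name
--             if "shirt" in item_type or "top" in item_type:
--                 slots["top"].append(item)
--             elif "pant" in item_type or "jean" in item_type or "short" in item_type:
--                 slots["bottom"].append(item)
--             elif "shoe" in item_type or "sneak" in item_type:
--                 slots["shoes"].append(item)
--
--     return slots
-- ===== SOURCE B (Python) =====
-- # One reverse table type -> slot (overlapping types hoodie/sweater/blazer map to
-- # "top", exactly as the elif chain resolves them), then a dict comprehension of
-- # filters; the substring fallback becomes a small rule table.
--
-- TYPE_TO_SLOT = {
--     "shirt": "top", "tshirt": "top", "formal_shirt": "top", "hoodie": "top",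
--     "sweater": "top", "kurta": "top", "sherwani": "top", "blazer": "top",
--     "jeans": "bottom", "formal_pants": "bottom", "cargo_pants": "bottom",
--     "shorts": "bottom", "track_pants": "bottom", "pyjama": "bottom",
--     "pants": "bottom", "skirt": "bottom",
--     "shoes": "shoes", "sneakers": "shoes", "loafers": "shoes",
--     "sandals": "shoes", "slippers": "shoes",
--     "jacket": "outerwear", "coat": "outerwear",
--     "watch": "accessory", "belt": "accessory", "cap": "accessory",
--     "socks": "accessory", "ring": "accessory", "chain": "accessory",
--     "bracelet": "accessory", "tie": "accessory", "scarf": "accessory",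
--     "bag": "accessory", "accessories": "accessory",
-- }
--
-- GUESS_RULES = [
--     (("shirt", "top"), "top"),
--     (("pant", "jean", "short"), "bottom"),
--     (("shoe", "sneak"), "shoes"),
-- ]
--
--
-- def _slot_of(item):
--     t = item.get("type", "unknown")
--     slot = TYPE_TO_SLOT.get(t)
--     if slot is not None:
--         return slot
--     for subs, s in GUESS_RULES:
--         if any(sub in t for sub in subs):
--             return s
--     return None
--
--
-- def _group_by_slot(clothes):
--     return {slot: [item for item in clothes if _slot_of(item) == slot]
--             for slot in ("top", "bottom", "shoes", "outerwear", "accessory")}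
-- ===== Notes on version B (the rewrite author's own statement) =====
-- stated objective: idiomatic
-- what changed: Replaces the five-set elif chain with mutating appends by a precomputed type->slot dict (priority baked in for the overlapping hoodie/sweater/blazer types), a substring rule table for the fallback, and a dict comprehension of filters instead of a stateful loop.
import Mathlib
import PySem

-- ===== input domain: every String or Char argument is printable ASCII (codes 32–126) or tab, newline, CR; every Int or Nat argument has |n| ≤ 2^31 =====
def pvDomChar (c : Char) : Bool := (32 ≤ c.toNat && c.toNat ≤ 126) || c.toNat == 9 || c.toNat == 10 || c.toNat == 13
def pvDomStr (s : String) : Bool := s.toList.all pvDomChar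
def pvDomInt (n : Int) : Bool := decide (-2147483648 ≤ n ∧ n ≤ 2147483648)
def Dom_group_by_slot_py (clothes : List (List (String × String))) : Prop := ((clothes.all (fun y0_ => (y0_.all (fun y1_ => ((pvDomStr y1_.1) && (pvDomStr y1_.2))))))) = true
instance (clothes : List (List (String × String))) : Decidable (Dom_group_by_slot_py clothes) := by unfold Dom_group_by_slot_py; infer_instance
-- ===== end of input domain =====

-- B replaces A's five-set elif chain with mutating appends by one precomputed type->slot
-- table plus a substring rule list, returning a dict comprehension of filters (idiomatic).


-- ===== PORT A =====
def TOP_TYPES : PySem.Set String := PySem.Set.ofList ["shirt", "tshirt", "formal_shirt", "hoodie", "sweater", "kurta", "sherwani", "blazer"]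
def BOTTOM_TYPES : PySem.Set String := PySem.Set.ofList ["jeans", "formal_pants", "cargo_pants", "shorts", "track_pants", "pyjama", "pants", "skirt"]
def SHOE_TYPES : PySem.Set String := PySem.Set.ofList ["shoes", "sneakers", "loafers", "sandals", "slippers"]
def OUTERWEAR_TYPES : PySem.Set String := PySem.Set.ofList ["jacket", "coat", "blazer", "hoodie", "sweater"]
def ACCESSORY_TYPES : PySem.Set String := PySem.Set.ofList ["watch", "belt", "cap", "socks", "ring", "chain", "bracelet", "tie", "scarf", "bag", "accessories"]

-- literal port of A's loop; slots["k"].append(item) is slots.modify "k" [] (· ++ [item])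
-- (the key is always present, so the default [] is never used)
def group_by_slot_py (clothes : List (List (String × String))) : List (String × List (List (String × String))) :=
  let slots : PySem.Dict String (List (List (String × String))) :=
    PySem.Dict.mk [("top", []), ("bottom", []), ("shoes", []), ("outerwear", []), ("accessory", [])]
  (clothes.foldl (fun slots item =>
    let item_type := (PySem.Dict.mk item).getD "type" "unknown"
    if PySem.Set.contains TOP_TYPES item_type then slots.modify "top" [] (· ++ [item])
    else if PySem.Set.contains BOTTOM_TYPES item_type then slots.modify "bottom" [] (· ++ [item])
    else if PySem.Set.contains SHOE_TYPES item_type then slots.modify "shoes" [] (· ++ [item])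
    else if PySem.Set.contains OUTERWEAR_TYPES item_type then slots.modify "outerwear" [] (· ++ [item])
    else if PySem.Set.contains ACCESSORY_TYPES item_type then slots.modify "accessory" [] (· ++ [item])
    else if PySem.Str.isIn "shirt" item_type || PySem.Str.isIn "top" item_type then slots.modify "top" [] (· ++ [item])
    else if PySem.Str.isIn "pant" item_type || PySem.Str.isIn "jean" item_type || PySem.Str.isIn "short" item_type then slots.modify "bottom" [] (· ++ [item])
    else if PySem.Str.isIn "shoe" item_type || PySem.Str.isIn "sneak" item_type then slots.modify "shoes" [] (· ++ [item])
    else slots) slots).items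

-- ===== PORT B =====
def TYPE_TO_SLOT : PySem.Dict String String := PySem.Dict.mk [
  ("shirt", "top"), ("tshirt", "top"), ("formal_shirt", "top"), ("hoodie", "top"),
  ("sweater", "top"), ("kurta", "top"), ("sherwani", "top"), ("blazer", "top"),
  ("jeans", "bottom"), ("formal_pants", "bottom"), ("cargo_pants", "bottom"),
  ("shorts", "bottom"), ("track_pants", "bottom"), ("pyjama", "bottom"),
  ("pants", "bottom"), ("skirt", "bottom"),
  ("shoes", "shoes"), ("sneakers", "shoes"), ("loafers", "shoes"),
  ("sandals", "shoes"), ("slippers", "shoes"),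
  ("jacket", "outerwear"), ("coat", "outerwear"),
  ("watch", "accessory"), ("belt", "accessory"), ("cap", "accessory"),
  ("socks", "accessory"), ("ring", "accessory"), ("chain", "accessory"),
  ("bracelet", "accessory"), ("tie", "accessory"), ("scarf", "accessory"),
  ("bag", "accessory"), ("accessories", "accessory")]

def GUESS_RULES : List (List String × String) :=
  [(["shirt", "top"], "top"), (["pant", "jean", "short"], "bottom"), (["shoe", "sneak"], "shoes")]

-- _slot_of: table lookup, else first matching substring rule (the for/return loop is find?)
def slot_of (item : List (String × String)) : Option String :=
  let t := (PySem.Dict.mk item).getD "type" "unknown"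
  match TYPE_TO_SLOT.get? t with
  | some slot => some slot
  | none => (GUESS_RULES.find? (fun r => r.1.any (fun sub => PySem.Str.isIn sub t))).map (·.2)

def group_by_slot_py_alt (clothes : List (List (String × String))) : List (String × List (List (String × String))) :=
  ["top", "bottom", "shoes", "outerwear", "accessory"].map
    (fun slot => (slot, clothes.filter (fun item => slot_of item == some slot)))

-- ===== PRECONDITION & SPEC =====
def Spec_group_by_slot_py (clothes : List (List (String × String))) (out : List (String × List (List (String × String)))) : Prop := out = group_by_slot_py_alt clothes
instance (clothes : List (List (String × String))) (out : List (String × List (List (String × String)))) : Decidable (Spec_group_by_slot_py clothes out) := by unfold Spec_group_by_slot_py; infer_instance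

-- ===== CLAIM (what is proved, stated in full; the proofs are below) =====
def Claim_equal_group_by_slot_py : Prop := ∀ (clothes : List (List (String × String))), Dom_group_by_slot_py clothes → Spec_group_by_slot_py clothes (group_by_slot_py clothes)

-- ===== LEMMAS AND PROOFS =====

-- B's classifier as a function of the type string alone
def slotOfT (t : String) : Option String :=
  match TYPE_TO_SLOT.get? t with
  | some slot => some slot
  | none => (GUESS_RULES.find? (fun r => r.1.any (fun sub => PySem.Str.isIn sub t))).map (·.2)

lemma slot_of_eq (item : List (String × String)) :
    slot_of item = slotOfT ((PySem.Dict.mk item).getD "type" "unknown") := rfl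

-- B's single-table lookup resolves every type string exactly as A's elif chain does
set_option maxHeartbeats 2000000 in
lemma classify (t : String) :
    slotOfT t =
      (if PySem.Set.contains TOP_TYPES t then some "top"
       else if PySem.Set.contains BOTTOM_TYPES t then some "bottom"
       else if PySem.Set.contains SHOE_TYPES t then some "shoes"
       else if PySem.Set.contains OUTERWEAR_TYPES t then some "outerwear"
       else if PySem.Set.contains ACCESSORY_TYPES t then some "accessory"
       else if PySem.Str.isIn "shirt" t || PySem.Str.isIn "top" t then some "top"
       else if PySem.Str.isIn "pant" t || PySem.Str.isIn "jean" t || PySem.Str.isIn "short" t then some "bottom"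
       else if PySem.Str.isIn "shoe" t || PySem.Str.isIn "sneak" t then some "shoes"
       else none) := by
  by_cases h : t ∈ ["shirt", "tshirt", "formal_shirt", "hoodie", "sweater", "kurta", "sherwani", "blazer",
      "jeans", "formal_pants", "cargo_pants", "shorts", "track_pants", "pyjama", "pants", "skirt",
      "shoes", "sneakers", "loafers", "sandals", "slippers", "jacket", "coat",
      "watch", "belt", "cap", "socks", "ring", "chain", "bracelet", "tie", "scarf", "bag", "accessories"]
  · fin_cases h <;> rfl
  · simp only [List.mem_cons, List.not_mem_nil, or_false, not_or] at h
    obtain ⟨n1,n2,n3,n4,n5,n6,n7,n8,n9,n10,n11,n12,n13,n14,n15,n16,n17,n18,n19,n20,n21,n22,n23,n24,n25,n26,n27,n28,n29,n30,n31,n32,n33,n34⟩ := h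
    simp [slotOfT, TYPE_TO_SLOT, TOP_TYPES, BOTTOM_TYPES, SHOE_TYPES, OUTERWEAR_TYPES, ACCESSORY_TYPES,
      GUESS_RULES, PySem.Dict.get?_mk_cons, PySem.Set.ofList, PySem.Set.contains,
      Ne.symm n1, Ne.symm n2, Ne.symm n3, Ne.symm n4, Ne.symm n5, Ne.symm n6, Ne.symm n7, Ne.symm n8,
      Ne.symm n9, Ne.symm n10, Ne.symm n11, Ne.symm n12, Ne.symm n13, Ne.symm n14, Ne.symm n15, Ne.symm n16,
      Ne.symm n17, Ne.symm n18, Ne.symm n19, Ne.symm n20, Ne.symm n21, Ne.symm n22, Ne.symm n23, Ne.symm n24,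
      Ne.symm n25, Ne.symm n26, Ne.symm n27, Ne.symm n28, Ne.symm n29, Ne.symm n30, Ne.symm n31, Ne.symm n32,
      Ne.symm n33, Ne.symm n34,
      n1,n2,n3,n4,n5,n6,n7,n8,n9,n10,n11,n12,n13,n14,n15,n16,n17,n18,n19,n20,n21,n22,n23,n24,n25,n26,n27,n28,n29,n30,n31,n32,n33,n34]
    simp [PySem.Dict.get?, List.find?_cons]
    cases hs1 : PySem.Chars.isIn ['s','h','i','r','t'] t.toList <;>
    cases hs2 : PySem.Chars.isIn ['t','o','p'] t.toList <;>
    cases hs3 : PySem.Chars.isIn ['p','a','n','t'] t.toList <;>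
    cases hs4 : PySem.Chars.isIn ['j','e','a','n'] t.toList <;>
    cases hs5 : PySem.Chars.isIn ['s','h','o','r','t'] t.toList <;>
    cases hs6 : PySem.Chars.isIn ['s','h','o','e'] t.toList <;>
    cases hs7 : PySem.Chars.isIn ['s','n','e','a','k'] t.toList <;>
    simp_all

-- A's fold, with the step written as a named function (defeq to the lambda in the port)
def aStep (slots : PySem.Dict String (List (List (String × String)))) (item : List (String × String)) :
    PySem.Dict String (List (List (String × String))) :=
  let item_type := (PySem.Dict.mk item).getD "type" "unknown"
  if PySem.Set.contains TOP_TYPES item_type then slots.modify "top" [] (· ++ [item])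
  else if PySem.Set.contains BOTTOM_TYPES item_type then slots.modify "bottom" [] (· ++ [item])
  else if PySem.Set.contains SHOE_TYPES item_type then slots.modify "shoes" [] (· ++ [item])
  else if PySem.Set.contains OUTERWEAR_TYPES item_type then slots.modify "outerwear" [] (· ++ [item])
  else if PySem.Set.contains ACCESSORY_TYPES item_type then slots.modify "accessory" [] (· ++ [item])
  else if PySem.Str.isIn "shirt" item_type || PySem.Str.isIn "top" item_type then slots.modify "top" [] (· ++ [item])
  else if PySem.Str.isIn "pant" item_type || PySem.Str.isIn "jean" item_type || PySem.Str.isIn "short" item_type then slots.modify "bottom" [] (· ++ [item])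
  else if PySem.Str.isIn "shoe" item_type || PySem.Str.isIn "sneak" item_type then slots.modify "shoes" [] (· ++ [item])
  else slots

def mkSlots (t b s o a : List (List (String × String))) : PySem.Dict String (List (List (String × String))) :=
  PySem.Dict.mk [("top", t), ("bottom", b), ("shoes", s), ("outerwear", o), ("accessory", a)]

lemma modify_top (t b s o a : List (List (String × String))) (f : List (List (String × String)) → List (List (String × String))) :
    (mkSlots t b s o a).modify "top" [] f = mkSlots (f t) b s o a := rfl
lemma modify_bottom (t b s o a : List (List (String × String))) (f : List (List (String × String)) → List (List (String × String))) :
    (mkSlots t b s o a).modify "bottom" [] f = mkSlots t (f b) s o a := rfl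
lemma modify_shoes (t b s o a : List (List (String × String))) (f : List (List (String × String)) → List (List (String × String))) :
    (mkSlots t b s o a).modify "shoes" [] f = mkSlots t b (f s) o a := rfl
lemma modify_outerwear (t b s o a : List (List (String × String))) (f : List (List (String × String)) → List (List (String × String))) :
    (mkSlots t b s o a).modify "outerwear" [] f = mkSlots t b s (f o) a := rfl
lemma modify_accessory (t b s o a : List (List (String × String))) (f : List (List (String × String)) → List (List (String × String))) :
    (mkSlots t b s o a).modify "accessory" [] f = mkSlots t b s o (f a) := rfl

set_option maxHeartbeats 2000000 in
lemma aStep_eq (x : List (String × String)) (t b s o a : List (List (String × String))) :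
    aStep (mkSlots t b s o a) x =
      mkSlots (t ++ if slot_of x == some "top" then [x] else [])
              (b ++ if slot_of x == some "bottom" then [x] else [])
              (s ++ if slot_of x == some "shoes" then [x] else [])
              (o ++ if slot_of x == some "outerwear" then [x] else [])
              (a ++ if slot_of x == some "accessory" then [x] else []) := by
  simp only [slot_of_eq]
  have hc := classify ((PySem.Dict.mk x).getD "type" "unknown")
  unfold aStep
  simp only []
  split_ifs at hc ⊢ <;>
    simp_all [modify_top, modify_bottom, modify_shoes, modify_outerwear, modify_accessory]

lemma foldl_inv (l : List (List (String × String))) :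
    ∀ t b s o a, l.foldl aStep (mkSlots t b s o a) =
      mkSlots (t ++ l.filter (fun x => slot_of x == some "top"))
              (b ++ l.filter (fun x => slot_of x == some "bottom"))
              (s ++ l.filter (fun x => slot_of x == some "shoes"))
              (o ++ l.filter (fun x => slot_of x == some "outerwear"))
              (a ++ l.filter (fun x => slot_of x == some "accessory")) := by
  induction l with
  | nil => intro t b s o a; simp [mkSlots]
  | cons x xs ih =>
      intro t b s o a
      simp only [List.foldl_cons, aStep_eq, ih, List.filter_cons]
      split_ifs <;> simp_all

-- ===== VERDICT (by name: the statement is the Claim_ definition above) =====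
theorem group_by_slot_py_spec : Claim_equal_group_by_slot_py := by
  intro clothes _
  unfold Spec_group_by_slot_py group_by_slot_py group_by_slot_py_alt
  show (clothes.foldl aStep (mkSlots [] [] [] [] [])).items = _
  rw [foldl_inv]
  simp [mkSlots]
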